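-- pv_equiv track=rewrite | github.com/AroundInteger/mcp_nl_query | app.py | categorize_features
-- ===== SOURCE A (Python) =====
-- def categorize_features(features):
--     """
--     Categorize features into absolute (_i) and relative (_r) metrics.
--     """
--     absolute_features = [f for f in features if f.endswith('_i')]
--     relative_features = [f for f in features if f.endswith('_r')]
--     other_features = [f for f in features if not (f.endswith('_i') or f.endswith('_r'))]
--
--     return {
--         'absolute': absolute_features,
--         'relative': relative_features,
--         'other': other_features
--     }
-- ===== SOURCE B (Python) =====
-- def categorize_features(features):
--     """Staged binary partitions: split off '_i' features first, then split the
--     remainder on '_r'; the second stage never sees the '_i' features."""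
--     def split(items, pred):
--         yes, no = [], []
--         for x in items:
--             (yes if pred(x) else no).append(x)
--         return yes, no
--
--     absolute, rest = split(features, lambda f: f.endswith('_i'))
--     relative, other = split(rest, lambda f: f.endswith('_r'))
--     return {'absolute': absolute, 'relative': relative, 'other': other}
-- ===== Notes on version B (the rewrite author's own statement) =====
-- stated objective: alternative
-- what changed: Two staged binary partitions (a reusable split helper: first separate '_i' features from the rest, then partition only that remainder on '_r') replace A's three independent filter scans of the whole list; correctness relies on '_i' and '_r' suffixes being mutually exclusive.
import Mathlib
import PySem

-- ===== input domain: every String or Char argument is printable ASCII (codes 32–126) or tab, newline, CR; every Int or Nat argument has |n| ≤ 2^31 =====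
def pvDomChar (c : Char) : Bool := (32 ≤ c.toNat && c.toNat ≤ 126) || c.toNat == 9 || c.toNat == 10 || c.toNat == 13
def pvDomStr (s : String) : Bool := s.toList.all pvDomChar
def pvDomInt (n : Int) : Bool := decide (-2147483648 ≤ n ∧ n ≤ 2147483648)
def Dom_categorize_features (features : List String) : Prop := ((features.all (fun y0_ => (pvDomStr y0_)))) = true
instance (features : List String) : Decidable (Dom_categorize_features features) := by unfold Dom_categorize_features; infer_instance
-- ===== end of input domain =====

-- B categorizes by two staged binary partitions (split off '_i', then split the remainder on '_r') instead of A's three filter scans; same return value.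


-- ===== PORT A =====
-- three comprehension scans, then the dict literal
def categorize_features (features : List String) : List (String × List String) :=
  let absolute_features := features.filter (fun f => PySem.Str.endswith f "_i")
  let relative_features := features.filter (fun f => PySem.Str.endswith f "_r")
  let other_features := features.filter (fun f => !(PySem.Str.endswith f "_i" || PySem.Str.endswith f "_r"))
  [("absolute", absolute_features), ("relative", relative_features), ("other", other_features)]

-- ===== PORT B =====
-- the split helper: one loop appending each item to the yes- or no-bucket
def pvSplit (items : List String) (pred : String → Bool) : List String × List String :=
  items.foldl (fun (acc : List String × List String) x =>
    if pred x then (acc.1 ++ [x], acc.2) else (acc.1, acc.2 ++ [x])) ([], [])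

-- staged binary partitions: '_i' off the whole list, then '_r' off the remainder
def categorize_features_alt (features : List String) : List (String × List String) :=
  let p1 := pvSplit features (fun f => PySem.Str.endswith f "_i")
  let p2 := pvSplit p1.2 (fun f => PySem.Str.endswith f "_r")
  [("absolute", p1.1), ("relative", p2.1), ("other", p2.2)]

-- ===== PRECONDITION & SPEC =====
def Spec_categorize_features (features : List String) (out : List (String × List String)) : Prop := out = categorize_features_alt features
instance (features : List String) (out : List (String × List String)) : Decidable (Spec_categorize_features features out) := by unfold Spec_categorize_features; infer_instance

-- ===== CLAIM (what is proved, stated in full; the proofs are below) =====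
def Claim_equal_categorize_features : Prop := ∀ (features : List String), Dom_categorize_features features → Spec_categorize_features features (categorize_features features)

-- ===== LEMMAS AND PROOFS =====
-- a string cannot end with both '_i' and '_r'
theorem not_endswith_both (l : List Char) (hi : PySem.Chars.endswith l ['_', 'i'] = true) :
    PySem.Chars.endswith l ['_', 'r'] = false := by
  by_contra hr
  rw [Bool.not_eq_false, PySem.Chars.endswith_iff] at hr
  rw [PySem.Chars.endswith_iff] at hi
  obtain ⟨t1, h1⟩ := hi
  obtain ⟨t2, h2⟩ := hr
  rw [← h1] at h2
  have := (List.append_inj' h2 rfl).2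
  simp at this

-- invariant of the split loop: from (a, b) it yields (a ++ filter pred, b ++ filter ¬pred)
theorem split_fold_inv (items : List String) (pred : String → Bool) (a b : List String) :
    items.foldl (fun (acc : List String × List String) x =>
      if pred x then (acc.1 ++ [x], acc.2) else (acc.1, acc.2 ++ [x])) (a, b)
    = (a ++ items.filter pred, b ++ items.filter (fun x => !pred x)) := by
  induction items generalizing a b with
  | nil => simp
  | cons x xs ih =>
    simp only [List.foldl_cons, List.filter_cons]
    by_cases h : pred x
    · rw [if_pos h, ih]; simp [h]
    · rw [if_neg h, ih]; simp [h]

theorem pvSplit_eq (items : List String) (pred : String → Bool) :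
    pvSplit items pred = (items.filter pred, items.filter (fun x => !pred x)) := by
  unfold pvSplit
  rw [split_fold_inv]
  simp

-- ===== VERDICT (by name: the statement is the Claim_ definition above) =====
theorem categorize_features_spec : Claim_equal_categorize_features := by
  intro features _
  unfold Spec_categorize_features
  simp only [categorize_features, categorize_features_alt, pvSplit_eq, List.filter_filter]
  have h1 : List.filter (fun a => PySem.Str.endswith a "_r" && !PySem.Str.endswith a "_i") features
      = List.filter (fun f => PySem.Str.endswith f "_r") features := by
    apply List.filter_congr; intro x _
    by_cases hi : PySem.Str.endswith x "_i"
    · simp only [PySem.Str.endswith] at hi ⊢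
      simp [not_endswith_both x.toList hi]
    · have hi' : PySem.Chars.endswith x.toList ['_','i'] = false := by simpa using hi
      simp [hi', Bool.and_comm]
  have h2 : List.filter (fun a => !PySem.Str.endswith a "_r" && !PySem.Str.endswith a "_i") features
      = List.filter (fun f => !(PySem.Str.endswith f "_i" || PySem.Str.endswith f "_r")) features := by
    apply List.filter_congr; intro x _
    by_cases hi : PySem.Str.endswith x "_i"
    · simp only [PySem.Str.endswith] at hi ⊢
      simp [not_endswith_both x.toList hi]
    · have hi' : PySem.Chars.endswith x.toList ['_','i'] = false := by simpa using hi
      simp [hi', Bool.and_comm]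
  rw [h1, h2]
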